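-- pv_equiv track=rewrite | github.com/777bareman777/It-is-coding-test | chapter-3-greedy/큰-수의-법칙-book.py | solution
-- ===== SOURCE A (Python) =====
-- def solution(N,M,K,data):
--     data.sort() # 입력받은 수 정렬
--     first = data[N-1] # 가장 큰 수
--     second = data[N-2] # 두 번쨰로 큰 수
--
--     result = 0
--     while True:
--         for i in range(K): # 가장 큰 수를 K번 더하기
--             if M == 0: # m이 0이라면 반복문 탈출
--                 break;
--             result += first
--             M -= 1 # 더할 때마다 1씩 빼기
--         if M == 0: # m이 0이라면 반복문 탈출
--             break
--         result += second # 두 번째로 큰 수를 한번 더하기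
--         M -= 1 # 더할 때마다 1씩 빼기
--
--     return result
-- ===== SOURCE B (Python) =====
-- def solution(N, M, K, data):
--     s = sorted(data)
--     first, second = s[N - 1], s[N - 2]
--     # M picks = full blocks of (K firsts + 1 second) plus a remainder of firsts
--     cnt_first = (M // (K + 1)) * K + M % (K + 1)
--     return cnt_first * first + (M - cnt_first) * second
-- ===== Notes on version B (the rewrite author's own statement) =====
-- stated objective: simpler
-- what changed: Replaces A's pick-by-pick simulation loop (M iterations of while/for with break flags) with a closed-form count of 'first' picks via M // (K+1) blocks plus the remainder.
-- outside the precondition, e.g. on solution(2, 3, -1, [1, 2]): A returns 3, B raises ZeroDivisionError; on solution(2, 3, -3, [1, 2]): A returns 3, B returns 8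
import Mathlib
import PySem

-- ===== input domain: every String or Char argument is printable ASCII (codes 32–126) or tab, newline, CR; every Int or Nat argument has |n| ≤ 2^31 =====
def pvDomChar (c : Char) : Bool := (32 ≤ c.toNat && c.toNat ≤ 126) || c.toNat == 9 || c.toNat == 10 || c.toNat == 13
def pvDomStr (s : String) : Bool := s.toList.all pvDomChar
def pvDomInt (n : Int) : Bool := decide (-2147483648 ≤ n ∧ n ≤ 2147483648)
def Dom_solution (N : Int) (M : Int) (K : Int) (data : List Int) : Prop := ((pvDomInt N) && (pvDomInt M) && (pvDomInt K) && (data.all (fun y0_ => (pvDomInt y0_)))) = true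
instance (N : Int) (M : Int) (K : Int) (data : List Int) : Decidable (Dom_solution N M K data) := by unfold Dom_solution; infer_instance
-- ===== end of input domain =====

-- B replaces A's pick-by-pick simulation loop with a closed-form block count (simpler);
-- equivalence is about the RETURN value only (A sorts `data` in place, B does not mutate it).

-- ===== PORT A =====
-- inner 'for i in range(K)': iterate K.toNat times (i unused), breaking when M == 0;
-- state is (M, result)
def solInnerA (first : Int) : Nat → Int × Int → Int × Int
  | 0, st => st
  | n + 1, (M, result) =>
      if M = 0 then (M, result)
      else solInnerA first n (M - 1, result + first)

-- outer 'while True': fuel guards totality only (A diverges for M < 0; fuel M.toNat + 1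
-- is enough whenever the Python loop terminates, since each pass that recurses lowers M)
def solOuterA (first second K : Int) : Nat → Int → Int → Int
  | 0, _, result => result
  | fuel + 1, M, result =>
      let st := solInnerA first K.toNat (M, result)
      if st.1 = 0 then st.2
      else solOuterA first second K fuel (st.1 - 1) (st.2 + second)

def solution (N : Int) (M : Int) (K : Int) (data : List Int) : Int :=
  match PySem.List.pyGet? (PySem.List.sorted data (fun x => x) false) (N - 1),
        PySem.List.pyGet? (PySem.List.sorted data (fun x => x) false) (N - 2) with
  | some first, some second => solOuterA first second K (M.toNat + 1) M 0
  | _, _ => 0  -- IndexError in Python; excluded by Pre_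

-- ===== PORT B =====
def solution_alt (N : Int) (M : Int) (K : Int) (data : List Int) : Int :=
  match PySem.List.pyGet? (PySem.List.sorted data (fun x => x) false) (N - 1) with
  | none => 0  -- IndexError in Python; excluded by Pre_
  | some first =>
    match PySem.List.pyGet? (PySem.List.sorted data (fun x => x) false) (N - 2) with
    | none => 0  -- IndexError in Python; excluded by Pre_
    | some second =>
        let cntFirst := PySem.Int.floordiv M (K + 1) * K + PySem.Int.mod M (K + 1)
        cntFirst * first + (M - cntFirst) * second

-- ===== PRECONDITION & SPEC =====
-- Pre_ excludes: out-of-range N-1/N-2 (A raises IndexError), M < 0 (A's while loop never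
-- terminates), and K < 0 — there A's empty range(K) accidentally returns M * second while
-- B's block formula divides by K + 1 ≤ 0 and raises ZeroDivisionError at K = -1.
def Pre_solution (N : Int) (M : Int) (K : Int) (data : List Int) : Prop :=
  PySem.Raise.InRange data.length (N - 1) ∧ PySem.Raise.InRange data.length (N - 2) ∧
    0 ≤ M ∧ 0 ≤ K
instance (N : Int) (M : Int) (K : Int) (data : List Int) : Decidable (Pre_solution N M K data) := by
  unfold Pre_solution; infer_instance

def pvWitness_solution : Int × Int × Int × List Int := (5, 8, 3, ([2, 4, 5, 4, 6] : List Int))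

def Spec_solution (N : Int) (M : Int) (K : Int) (data : List Int) (out : Int) : Prop := out = solution_alt N M K data
instance (N : Int) (M : Int) (K : Int) (data : List Int) (out : Int) : Decidable (Spec_solution N M K data out) := by unfold Spec_solution; infer_instance

-- ===== CLAIM (what is proved, stated in full; the proofs are below) =====
def Claim_equal_solution : Prop := ∀ (N : Int) (M : Int) (K : Int) (data : List Int), Dom_solution N M K data → Pre_solution N M K data → Spec_solution N M K data (solution N M K data)

-- ===== LEMMAS AND PROOFS =====

-- the closed-form count of 'first' picks
def cntF (M K : Int) : Int := PySem.Int.floordiv M (K + 1) * K + PySem.Int.mod M (K + 1)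

-- inner loop, enough fuel (n ≥ M ≥ 0): runs M steps and stops at M = 0
lemma solInnerA_drain (first : Int) (n : Nat) (M result : Int)
    (h0 : 0 ≤ M) (hn : M ≤ (n : Int)) :
    solInnerA first n (M, result) = (0, result + M * first) := by
  induction n generalizing M result with
  | zero => interval_cases M; simp [solInnerA]
  | succ n ih =>
      by_cases hM : M = 0
      · simp [solInnerA, hM]
      · rw [solInnerA, if_neg hM, ih (M - 1) (result + first) (by omega) (by omega)]
        exact Prod.ext rfl (by ring)

-- inner loop, fuel n ≤ M: runs all n steps without hitting M = 0
lemma solInnerA_full (first : Int) (n : Nat) (M result : Int)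
    (hn : (n : Int) ≤ M) :
    solInnerA first n (M, result) = (M - n, result + n * first) := by
  induction n generalizing M result with
  | zero => simp [solInnerA]
  | succ n ih =>
      rw [solInnerA, if_neg (by push_cast at hn ⊢; omega),
        ih (M - 1) (result + first) (by push_cast at hn ⊢; omega)]
      push_cast; simp only [Prod.mk.injEq]; constructor <;> ring

-- the outer loop computes the closed form, given enough fuel
lemma solOuterA_closed (first second K : Int) (hK : 0 ≤ K) :
    ∀ (fuel : Nat) (M result : Int), 0 ≤ M → M < (fuel : Int) →
      solOuterA first second K fuel M result = result + cntF M K * first + (M - cntF M K) * second := by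
  intro fuel
  induction fuel with
  | zero => intro M result h0 h1; omega
  | succ fuel ih =>
      intro M result h0 h1
      have hK1 : (0:Int) < K + 1 := by omega
      by_cases hMK : K ≤ M
      · -- full inner pass: K picks of first, then one second, recurse on M - K - 1
        have hKt : (K.toNat : Int) = K := by omega
        rw [solOuterA, solInnerA_full first K.toNat M result (by omega)]
        by_cases hM0 : M - K.toNat = 0
        · -- M = K exactly: loop ends right after the inner pass
          rw [if_pos hM0]
          have hMK' : M = K := by omega
          have hd : PySem.Int.floordiv M (K + 1) = 0 :=
            (PySem.Int.floordiv_eq_iff_of_pos hK1).mpr (by constructor <;> omega)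
          have hm : PySem.Int.mod M (K + 1) = M := by
            have := PySem.Int.floordiv_mul_add_mod M (K + 1)
            rw [hd] at this; omega
          simp only [cntF, hd, hm]
          rw [hMK', hKt]; ring
        · rw [if_neg hM0]
          have hrec := ih (M - K.toNat - 1) (result + K.toNat * first + second)
            (by omega) (by push_cast at h1 ⊢; omega)
          rw [hrec]
          -- cntF (M) K = cntF (M - K - 1) K + K
          have hd : PySem.Int.floordiv M (K + 1)
              = PySem.Int.floordiv (M - K - 1) (K + 1) + 1 := by
            have hb := PySem.Int.floordiv_mul_add_mod (M - K - 1) (K + 1)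
            have hm0 := PySem.Int.mod_nonneg (M - K - 1) hK1
            have hm1 := PySem.Int.mod_lt (M - K - 1) hK1
            refine (PySem.Int.floordiv_eq_iff_of_pos hK1).mpr ⟨?_, ?_⟩ <;> nlinarith
          have hm : PySem.Int.mod M (K + 1) = PySem.Int.mod (M - K - 1) (K + 1) := by
            have h1' := PySem.Int.floordiv_mul_add_mod M (K + 1)
            have h2' := PySem.Int.floordiv_mul_add_mod (M - K - 1) (K + 1)
            rw [hd] at h1'; nlinarith [h1', h2']
          simp only [cntF, hd, hm, hKt]; ring
      · -- M < K: inner loop drains M to 0, outer loop returns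
        rw [solOuterA, solInnerA_drain first K.toNat M result h0 (by omega)]
        rw [if_pos rfl]
        have hd : PySem.Int.floordiv M (K + 1) = 0 :=
          (PySem.Int.floordiv_eq_iff_of_pos hK1).mpr (by constructor <;> omega)
        have hm : PySem.Int.mod M (K + 1) = M := by
          have := PySem.Int.floordiv_mul_add_mod M (K + 1)
          rw [hd] at this; omega
        simp only [cntF, hd, hm]; ring

-- ===== VERDICT (by name: the statement is the Claim_ definition above) =====
theorem solution_spec : Claim_equal_solution := by
  intro N M K data _ hpre
  obtain ⟨h1, h2, hM, hK⟩ := hpre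
  unfold Spec_solution solution solution_alt
  obtain ⟨f, hf⟩ : ∃ f, PySem.List.pyGet? (PySem.List.sorted data (fun x => x) false) (N - 1) = some f := by
    cases h : PySem.List.pyGet? (PySem.List.sorted data (fun x => x) false) (N - 1) with
    | none =>
        rw [PySem.List.pyGet?_eq_none_iff, PySem.List.length_sorted] at h
        exact absurd h1 h
    | some f => exact ⟨f, rfl⟩
  obtain ⟨g, hg⟩ : ∃ g, PySem.List.pyGet? (PySem.List.sorted data (fun x => x) false) (N - 2) = some g := by
    cases h : PySem.List.pyGet? (PySem.List.sorted data (fun x => x) false) (N - 2) with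
    | none =>
        rw [PySem.List.pyGet?_eq_none_iff, PySem.List.length_sorted] at h
        exact absurd h2 h
    | some g => exact ⟨g, rfl⟩
  rw [hf, hg]
  dsimp only
  rw [solOuterA_closed f g K hK (M.toNat + 1) M 0 hM (by omega)]
  simp only [cntF]; ring
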